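-- pv_equiv track=rewrite | github.com/agentbuft123/Visualizing-my-Social-Media-Usage | proj_final.py | get_ig_weekly_results
-- ===== SOURCE A (Python) =====
-- def get_ig_weekly_results(list_of_data):
--     user_id = list_of_data[0][0]
--     weekday_dict = {"Monday": {"posts": 0, "likes": 0}, "Tuesday": {"posts": 0, "likes": 0},
--     "Wednesday": {"posts": 0, "likes": 0}, "Thursday": {"posts": 0, "likes": 0},
--     "Friday": {"posts": 0, "likes": 0}, "Saturday": {"posts": 0, "likes": 0},
--     "Sunday": {"posts": 0, "likes": 0}}
--     for post in list_of_data: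
--         if post[2] == "Monday":
--             weekday_dict["Monday"]['posts'] += 1
--             weekday_dict["Monday"]['likes'] += post[1]
--         elif post[2] == "Tuesday":
--             weekday_dict["Tuesday"]['posts'] += 1
--             weekday_dict["Tuesday"]['likes'] += post[1]
--         elif post[2] == "Wednesday":
--             weekday_dict["Wednesday"]['posts'] += 1
--             weekday_dict["Wednesday"]['likes'] += post[1]
--         elif post[2] == "Thursday":
--             weekday_dict["Thursday"]['posts'] += 1
--             weekday_dict["Thursday"]['likes'] += post[1]
--         elif post[2] == "Friday":
--             weekday_dict["Friday"]['posts'] += 1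
--             weekday_dict["Friday"]['likes'] += post[1]
--         elif post[2] == "Saturday":
--             weekday_dict["Saturday"]['posts'] += 1
--             weekday_dict["Saturday"]['likes'] += post[1]
--         else:
--             weekday_dict["Sunday"]['posts'] += 1
--             weekday_dict["Sunday"]['likes'] += post[1]
--     average_likes = {}
--     for weekday in weekday_dict:
--             average_likes[weekday] = weekday_dict[weekday]['likes']
--     average_likes["User ID"] = int(user_id)
--     return average_likes
-- ===== SOURCE B (Python) =====
-- DAYS = ["Monday", "Tuesday", "Wednesday", "Thursday", "Friday", "Saturday", "Sunday"]
--
-- def _norm(day):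
--     return day if day in DAYS[:6] else "Sunday"
--
-- def get_ig_weekly_results(list_of_data):
--     user_id = list_of_data[0][0]
--     result = {day: sum(post[1] for post in list_of_data if _norm(post[2]) == day)
--               for day in DAYS}
--     result["User ID"] = int(user_id)
--     return result
-- ===== Notes on version B (the rewrite author's own statement) =====
-- stated objective: simpler
-- what changed: Replaces the single accumulating pass with a seven-branch if/elif chain and mutable posts/likes counters by a normalize step plus one filtered sum per weekday (a dict comprehension over the ordered day list); the unused posts counters disappear.
import Mathlib
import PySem

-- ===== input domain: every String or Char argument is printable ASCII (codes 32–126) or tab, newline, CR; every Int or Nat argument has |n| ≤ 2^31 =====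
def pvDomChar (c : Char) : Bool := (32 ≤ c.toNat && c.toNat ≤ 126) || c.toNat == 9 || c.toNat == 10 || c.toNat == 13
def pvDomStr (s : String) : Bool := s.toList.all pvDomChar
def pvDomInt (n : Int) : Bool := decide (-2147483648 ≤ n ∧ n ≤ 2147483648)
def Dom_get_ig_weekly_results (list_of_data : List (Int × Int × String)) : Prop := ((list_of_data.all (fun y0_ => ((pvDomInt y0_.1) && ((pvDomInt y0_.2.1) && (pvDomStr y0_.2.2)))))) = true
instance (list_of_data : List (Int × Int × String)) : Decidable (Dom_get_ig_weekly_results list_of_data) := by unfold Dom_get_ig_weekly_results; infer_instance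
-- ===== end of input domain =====

-- B replaces A's single accumulating pass (7-branch if/elif chain, mutable posts/likes counters)
-- by a normalize step and one filtered sum per weekday; return value only, neither mutates input.

-- ===== PORT A =====
-- the mutable weekday_dict state: posts and likes per weekday (posts never read for the output, kept faithfully)
structure WdState where
  moP : Int
  moL : Int
  tuP : Int
  tuL : Int
  weP : Int
  weL : Int
  thP : Int
  thL : Int
  frP : Int
  frL : Int
  saP : Int
  saL : Int
  suP : Int
  suL : Int
deriving Repr, DecidableEq

def wdStep (s : WdState) (post : Int × Int × String) : WdState :=
  if post.2.2 = "Monday" then { s with moP := s.moP + 1, moL := s.moL + post.2.1 }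
  else if post.2.2 = "Tuesday" then { s with tuP := s.tuP + 1, tuL := s.tuL + post.2.1 }
  else if post.2.2 = "Wednesday" then { s with weP := s.weP + 1, weL := s.weL + post.2.1 }
  else if post.2.2 = "Thursday" then { s with thP := s.thP + 1, thL := s.thL + post.2.1 }
  else if post.2.2 = "Friday" then { s with frP := s.frP + 1, frL := s.frL + post.2.1 }
  else if post.2.2 = "Saturday" then { s with saP := s.saP + 1, saL := s.saL + post.2.1 }
  else { s with suP := s.suP + 1, suL := s.suL + post.2.1 }

def get_ig_weekly_results (list_of_data : List (Int × Int × String)) : List (String × Int) :=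
  match PySem.List.pyGet? list_of_data 0 with
  | none => []  -- Python raises IndexError here; excluded by Pre_
  | some first =>
    let user_id := first.1
    let w := list_of_data.foldl wdStep ⟨0,0,0,0,0,0,0,0,0,0,0,0,0,0⟩
    -- average_likes built in weekday_dict's insertion order, then "User ID" (int(user_id) = user_id)
    [("Monday", w.moL), ("Tuesday", w.tuL), ("Wednesday", w.weL), ("Thursday", w.thL),
     ("Friday", w.frL), ("Saturday", w.saL), ("Sunday", w.suL), ("User ID", user_id)]

-- ===== PORT B =====
def pvDays : List String := ["Monday", "Tuesday", "Wednesday", "Thursday", "Friday", "Saturday", "Sunday"]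

def normDay (day : String) : String := if day ∈ pvDays.take 6 then day else "Sunday"

def sumDay (list_of_data : List (Int × Int × String)) (day : String) : Int :=
  ((list_of_data.filter (fun post => normDay post.2.2 == day)).map (fun post => post.2.1)).sum

def get_ig_weekly_results_alt (list_of_data : List (Int × Int × String)) : List (String × Int) :=
  match PySem.List.pyGet? list_of_data 0 with
  | none => []  -- Python raises IndexError here; excluded by Pre_
  | some first =>
    (pvDays.map (fun day => (day, sumDay list_of_data day))) ++ [("User ID", first.1)]

-- ===== PRECONDITION & SPEC =====
-- both A and B raise IndexError on the empty list (list_of_data[0])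
def Pre_get_ig_weekly_results (list_of_data : List (Int × Int × String)) : Prop := list_of_data ≠ []
instance (list_of_data : List (Int × Int × String)) : Decidable (Pre_get_ig_weekly_results list_of_data) := by unfold Pre_get_ig_weekly_results; infer_instance

def pvWitness_get_ig_weekly_results : (List (Int × Int × String)) := [(5, 10, "Monday"), (5, 3, "Funday")]

def Spec_get_ig_weekly_results (list_of_data : List (Int × Int × String)) (out : List (String × Int)) : Prop := out = get_ig_weekly_results_alt list_of_data
instance (list_of_data : List (Int × Int × String)) (out : List (String × Int)) : Decidable (Spec_get_ig_weekly_results list_of_data out) := by unfold Spec_get_ig_weekly_results; infer_instance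

-- ===== CLAIM (what is proved, stated in full; the proofs are below) =====
def Claim_equal_get_ig_weekly_results : Prop := ∀ (list_of_data : List (Int × Int × String)), Dom_get_ig_weekly_results list_of_data → Pre_get_ig_weekly_results list_of_data → Spec_get_ig_weekly_results list_of_data (get_ig_weekly_results list_of_data)

-- ===== LEMMAS AND PROOFS =====

lemma sumDay_cons (p : Int × Int × String) (l : List (Int × Int × String)) (d : String) :
    sumDay (p :: l) d = (if normDay p.2.2 = d then p.2.1 else 0) + sumDay l d := by
  simp only [sumDay, List.filter_cons, beq_iff_eq]
  split_ifs with h <;> simp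

-- the invariant of A's loop: each likes field of the fold equals the initial field plus B's filtered sum
lemma fold_likes (l : List (Int × Int × String)) : ∀ (s : WdState),
    (l.foldl wdStep s).moL = s.moL + sumDay l "Monday" ∧
    (l.foldl wdStep s).tuL = s.tuL + sumDay l "Tuesday" ∧
    (l.foldl wdStep s).weL = s.weL + sumDay l "Wednesday" ∧
    (l.foldl wdStep s).thL = s.thL + sumDay l "Thursday" ∧
    (l.foldl wdStep s).frL = s.frL + sumDay l "Friday" ∧
    (l.foldl wdStep s).saL = s.saL + sumDay l "Saturday" ∧
    (l.foldl wdStep s).suL = s.suL + sumDay l "Sunday" := by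
  induction l with
  | nil => intro s; simp [sumDay]
  | cons p l ih =>
    intro s
    obtain ⟨h1, h2, h3, h4, h5, h6, h7⟩ := ih (wdStep s p)
    simp only [List.foldl_cons, h1, h2, h3, h4, h5, h6, h7, sumDay_cons]
    clear h1 h2 h3 h4 h5 h6 h7
    by_cases c1 : p.2.2 = "Monday"
    · simp [wdStep, c1, normDay, pvDays]; ring
    by_cases c2 : p.2.2 = "Tuesday"
    · simp [wdStep, c2, normDay, pvDays]; ring
    by_cases c3 : p.2.2 = "Wednesday"
    · simp [wdStep, c3, normDay, pvDays]; ring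
    by_cases c4 : p.2.2 = "Thursday"
    · simp [wdStep, c4, normDay, pvDays]; ring
    by_cases c5 : p.2.2 = "Friday"
    · simp [wdStep, c5, normDay, pvDays]; ring
    by_cases c6 : p.2.2 = "Saturday"
    · simp [wdStep, c6, normDay, pvDays]; ring
    · simp [wdStep, c1, c2, c3, c4, c5, c6, normDay, pvDays]; ring

-- the same with the zero initial state, as used by both ports
lemma fold_likes0 (l : List (Int × Int × String)) :
    (l.foldl wdStep ⟨0,0,0,0,0,0,0,0,0,0,0,0,0,0⟩).moL = sumDay l "Monday" ∧
    (l.foldl wdStep ⟨0,0,0,0,0,0,0,0,0,0,0,0,0,0⟩).tuL = sumDay l "Tuesday" ∧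
    (l.foldl wdStep ⟨0,0,0,0,0,0,0,0,0,0,0,0,0,0⟩).weL = sumDay l "Wednesday" ∧
    (l.foldl wdStep ⟨0,0,0,0,0,0,0,0,0,0,0,0,0,0⟩).thL = sumDay l "Thursday" ∧
    (l.foldl wdStep ⟨0,0,0,0,0,0,0,0,0,0,0,0,0,0⟩).frL = sumDay l "Friday" ∧
    (l.foldl wdStep ⟨0,0,0,0,0,0,0,0,0,0,0,0,0,0⟩).saL = sumDay l "Saturday" ∧
    (l.foldl wdStep ⟨0,0,0,0,0,0,0,0,0,0,0,0,0,0⟩).suL = sumDay l "Sunday" := by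
  obtain ⟨h1, h2, h3, h4, h5, h6, h7⟩ := fold_likes l ⟨0,0,0,0,0,0,0,0,0,0,0,0,0,0⟩
  exact ⟨by simpa using h1, by simpa using h2, by simpa using h3, by simpa using h4,
         by simpa using h5, by simpa using h6, by simpa using h7⟩

-- ===== VERDICT (by name: the statement is the Claim_ definition above) =====
theorem get_ig_weekly_results_spec : Claim_equal_get_ig_weekly_results := by
  intro l _ hpre
  unfold Spec_get_ig_weekly_results get_ig_weekly_results get_ig_weekly_results_alt
  cases l with
  | nil => exact absurd rfl hpre
  | cons p l =>
    obtain ⟨h1, h2, h3, h4, h5, h6, h7⟩ := fold_likes0 (p :: l)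
    have hget : PySem.List.pyGet? (p :: l) (0 : Int) = some p := by
      simp [PySem.List.pyGet?, PySem.List.pyIdx?]
    rw [hget]
    simp only [pvDays, List.map_cons, List.map_nil, List.nil_append, List.cons_append,
               h1, h2, h3, h4, h5, h6, h7]
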